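-- pv_equiv track=rewrite | github.com/simosund/Measuring-Network-Latency-from-a-Wireless-ISP | histogram_functions.py | sum_histograms
-- ===== SOURCE A (Python) =====
-- def add_to_histogram(dst, src):
--     if len(dst) < len(src):
--         raise ValueError("dst histogram smaller than src histogram")
--
--     for i in range(len(src)):
--         dst[i] += src[i]
--
--     return dst
--
-- def sum_histograms(hists):
--     if len(hists) == 0:
--         return []
--
--     n = max(len(hist) for hist in hists)
--
--     tot = [0] * n
--     for hist in hists:
--         add_to_histogram(tot, hist)
--
--     return tot
-- ===== SOURCE B (Python) =====
-- def sum_histograms(hists):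
--     n = max(map(len, hists), default=0)
--     return [sum(h[i] for h in hists if i < len(h)) for i in range(n)]
-- ===== Notes on version B (the rewrite author's own statement) =====
-- stated objective: simpler
-- what changed: B builds the result column-wise (one comprehension summing element i across all histograms) instead of A's row-by-row mutation of a running accumulator via the add_to_histogram helper.
import Mathlib
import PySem

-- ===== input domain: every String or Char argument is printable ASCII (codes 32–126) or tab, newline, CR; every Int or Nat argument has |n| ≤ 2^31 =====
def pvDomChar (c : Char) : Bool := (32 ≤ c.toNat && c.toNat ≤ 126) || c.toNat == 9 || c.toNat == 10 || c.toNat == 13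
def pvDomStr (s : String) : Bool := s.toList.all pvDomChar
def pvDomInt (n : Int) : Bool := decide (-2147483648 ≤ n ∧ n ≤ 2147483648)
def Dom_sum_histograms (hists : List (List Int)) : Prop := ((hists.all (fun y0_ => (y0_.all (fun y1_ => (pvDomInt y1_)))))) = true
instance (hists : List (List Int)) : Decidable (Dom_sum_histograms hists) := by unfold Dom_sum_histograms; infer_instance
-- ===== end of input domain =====

-- B sums each output position across all histograms in one comprehension instead of
-- accumulating row by row; return values agree everywhere (A mutates only its local list).

-- ===== PORT A =====
-- the `for i in range(len(src)): dst[i] += src[i]` loop of add_to_histogram;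
-- the ValueError branch (len(dst) < len(src)) is unreachable from sum_histograms,
-- where dst always has maximal length.
def add_to_histogram : List Int → List Int → List Int
  | dst, [] => dst
  | [], _ :: _ => []
  | d :: ds, s :: ss => (d + s) :: add_to_histogram ds ss

def sum_histograms (hists : List (List Int)) : List Int :=
  match hists with
  | [] => []                      -- if len(hists) == 0: return []
  | h :: rest =>
    -- n = max(len(hist) for hist in hists)  (hists nonempty here)
    let n := rest.foldl (fun m x => Nat.max m x.length) h.length
    -- tot = [0] * n; for hist in hists: add_to_histogram(tot, hist)
    (h :: rest).foldl (fun tot hist => add_to_histogram tot hist) (List.replicate n 0)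

-- ===== PORT B =====
def sum_histograms_alt (hists : List (List Int)) : List Int :=
  -- n = max(map(len, hists), default=0)
  let n := hists.foldl (fun m h => Nat.max m h.length) 0
  -- [sum(h[i] for h in hists if i < len(h)) for i in range(n)]
  (List.range n).map (fun i => (hists.filterMap (fun h => h[i]?)).sum)

-- ===== PRECONDITION & SPEC =====
def Spec_sum_histograms (hists : List (List Int)) (out : List Int) : Prop := out = sum_histograms_alt hists
instance (hists : List (List Int)) (out : List Int) : Decidable (Spec_sum_histograms hists out) := by unfold Spec_sum_histograms; infer_instance

-- ===== CLAIM (what is proved, stated in full; the proofs are below) =====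
def Claim_equal_sum_histograms : Prop := ∀ (hists : List (List Int)), Dom_sum_histograms hists → Spec_sum_histograms hists (sum_histograms hists)

-- ===== LEMMAS AND PROOFS =====

theorem length_addTo (a b : List Int) : (add_to_histogram a b).length = a.length := by
  induction a generalizing b with
  | nil => cases b <;> simp [add_to_histogram]
  | cons d ds ih => cases b <;> simp [add_to_histogram, ih]

theorem getD_addTo (a : List Int) : ∀ (b : List Int) (i : Nat), b.length ≤ a.length →
    (add_to_histogram a b).getD i 0 = a.getD i 0 + b.getD i 0 := by
  induction a with
  | nil =>
    intro b i hb
    cases b with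
    | nil => simp [add_to_histogram]
    | cons s ss => simp at hb
  | cons d ds ih =>
    intro b i hb
    cases b with
    | nil => simp [add_to_histogram]
    | cons s ss =>
      cases i with
      | zero => simp [add_to_histogram]
      | succ j =>
        simp only [add_to_histogram, List.getD_cons_succ]
        exact ih ss j (by simpa using hb)

theorem map_getD_range (a : List Int) :
    (List.range a.length).map (fun i => a.getD i 0) = a := by
  apply List.ext_getElem
  · simp
  · intro i h1 h2
    simp [List.getD_eq_getElem?_getD, List.getElem?_eq_getElem h2]

theorem colsum_cons (h : List Int) (hists : List (List Int)) (i : Nat) :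
    ((h :: hists).filterMap (fun x => x[i]?)).sum
      = h.getD i 0 + (hists.filterMap (fun x => x[i]?)).sum := by
  rw [List.getD_eq_getElem?_getD]
  cases hh : h[i]? <;> simp [hh]

theorem foldl_addTo (hists : List (List Int)) : ∀ (acc : List Int),
    (∀ h ∈ hists, h.length ≤ acc.length) →
    hists.foldl (fun tot hist => add_to_histogram tot hist) acc
      = (List.range acc.length).map
          (fun i => acc.getD i 0 + (hists.filterMap (fun h => h[i]?)).sum) := by
  induction hists with
  | nil =>
    intro acc _
    simp only [List.foldl_nil, List.filterMap_nil, List.sum_nil, add_zero]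
    exact (map_getD_range acc).symm
  | cons h t ih =>
    intro acc hlen
    have hh : h.length ≤ acc.length := hlen h (by simp)
    have ht : ∀ x ∈ t, x.length ≤ (add_to_histogram acc h).length := by
      intro x hx; rw [length_addTo]; exact hlen x (by simp [hx])
    simp only [List.foldl_cons]
    rw [ih (add_to_histogram acc h) ht, length_addTo]
    apply List.map_congr_left
    intro i _
    rw [getD_addTo acc h i hh, colsum_cons]
    have : h.getD i 0 = h[i]?.getD 0 := by rw [List.getD_eq_getElem?_getD]
    omega

theorem le_foldl_max : ∀ (hs : List (List Int)) (a : Nat),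
    a ≤ hs.foldl (fun m x => Nat.max m x.length) a := by
  intro hs
  induction hs with
  | nil => simp
  | cons h t ih =>
    intro a
    simp only [List.foldl_cons]
    exact le_trans (Nat.le_max_left a h.length) (ih _)

theorem mem_le_foldl_max : ∀ (hs : List (List Int)) (a : Nat) (h : List Int), h ∈ hs →
    h.length ≤ hs.foldl (fun m x => Nat.max m x.length) a := by
  intro hs
  induction hs with
  | nil => intro a h hh; simp at hh
  | cons x t ih =>
    intro a h hh
    simp only [List.foldl_cons]
    rcases List.mem_cons.mp hh with rfl | hh
    · exact le_trans (Nat.le_max_right a h.length) (le_foldl_max t _)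
    · exact ih _ h hh

-- ===== VERDICT (by name: the statement is the Claim_ definition above) =====
theorem sum_histograms_spec : Claim_equal_sum_histograms := by
  intro hists _
  unfold Spec_sum_histograms sum_histograms sum_histograms_alt
  cases hists with
  | nil => simp
  | cons h rest =>
    simp only
    have hn : (h :: rest).foldl (fun m x => Nat.max m x.length) 0
        = rest.foldl (fun m x => Nat.max m x.length) h.length := by
      simp
    rw [hn]
    set n := rest.foldl (fun m x => Nat.max m x.length) h.length with hndef
    have hmem : ∀ x ∈ (h :: rest), x.length ≤ (List.replicate n 0 : List Int).length := by
      intro x hx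
      rw [List.length_replicate]
      have := mem_le_foldl_max (h :: rest) 0 x hx
      simpa [hn] using this
    rw [foldl_addTo (h :: rest) (List.replicate n 0) hmem]
    simp
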